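-- pv_equiv track=rewrite | github.com/ronaldpedra/beecrowd | INICIANTE/python/Pagina_4/1158.py | soma_impares_consecutivos
-- ===== SOURCE A (Python) =====
-- def soma_impares_consecutivos(caso: list):
--     '''Calcula a soma dos impares consecutivos'''
--
--     soma = 0
--     impares = 0
--     passo = 0
--     while True:
--         if impares >= caso[1]:
--             break
--         teste = caso[0] + passo
--         if (teste) % 2 != 0:
--             soma += teste
--             impares += 1
--         passo += 1
--
--     return soma
-- ===== SOURCE B (Python) =====
-- def soma_impares_consecutivos(caso: list):
--     '''Calcula a soma dos impares consecutivos (forma fechada)'''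
--     inicio = caso[0]
--     n = caso[1]
--     if n <= 0:
--         return 0
--     primeiro = inicio if inicio % 2 != 0 else inicio + 1
--     # sum of n consecutive odd numbers starting at `primeiro` (step 2)
--     return n * primeiro + n * (n - 1)
-- ===== Notes on version B (the rewrite author's own statement) =====
-- stated objective: faster
-- what changed: Replaced the step-by-step while loop that scans integers one by one counting odds with the closed-form arithmetic-series formula n*firstOdd + n*(n-1).
import Mathlib
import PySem

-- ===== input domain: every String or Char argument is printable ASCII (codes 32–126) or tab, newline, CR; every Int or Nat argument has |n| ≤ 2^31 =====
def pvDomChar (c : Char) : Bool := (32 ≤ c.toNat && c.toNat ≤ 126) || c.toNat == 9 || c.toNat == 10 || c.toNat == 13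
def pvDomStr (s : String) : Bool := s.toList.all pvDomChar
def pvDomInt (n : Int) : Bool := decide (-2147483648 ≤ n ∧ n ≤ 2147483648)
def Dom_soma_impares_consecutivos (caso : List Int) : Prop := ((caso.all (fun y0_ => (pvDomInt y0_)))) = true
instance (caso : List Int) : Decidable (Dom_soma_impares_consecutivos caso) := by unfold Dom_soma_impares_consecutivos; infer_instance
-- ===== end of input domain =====

-- B replaces A's one-by-one scanning loop with the closed-form arithmetic-series formula (faster: O(1) vs O(n)).


-- ===== PORT A =====
-- the `while True` loop of A; state (soma, impares, passo).  `fuel` only makes the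
-- recursion structural: the parity of c0 + passo alternates, so the loop performs at
-- most 2*n + 1 iterations, and the caller passes fuel = (2*n).toNat + 2, which the
-- equivalence proof shows is never exhausted.
def pvSomaLoop (c0 n soma impares passo : Int) : Nat → Int
  | 0 => soma
  | fuel + 1 =>
    if impares < n then
      (if PySem.Int.mod (c0 + passo) 2 ≠ 0 then
         pvSomaLoop c0 n (soma + (c0 + passo)) (impares + 1) (passo + 1) fuel
       else
         pvSomaLoop c0 n soma impares (passo + 1) fuel)
    else soma

def soma_impares_consecutivos (caso : List Int) : Int :=
  pvSomaLoop (PySem.List.pyGetD caso 0 0) (PySem.List.pyGetD caso 1 0) 0 0 0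
    ((2 * PySem.List.pyGetD caso 1 0).toNat + 2)

-- ===== PORT B =====
def soma_impares_consecutivos_alt (caso : List Int) : Int :=
  let inicio := PySem.List.pyGetD caso 0 0
  let n := PySem.List.pyGetD caso 1 0
  if n ≤ 0 then 0
  else
    let primeiro := if PySem.Int.mod inicio 2 ≠ 0 then inicio else inicio + 1
    n * primeiro + n * (n - 1)

-- ===== PRECONDITION & SPEC =====
-- A indexes caso[1] (and caso[0]): it raises IndexError on lists of length < 2.
def Pre_soma_impares_consecutivos (caso : List Int) : Prop := 2 ≤ caso.length
instance (caso : List Int) : Decidable (Pre_soma_impares_consecutivos caso) := by unfold Pre_soma_impares_consecutivos; infer_instance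
def pvWitness_soma_impares_consecutivos : List Int := [3, 4]

def Spec_soma_impares_consecutivos (caso : List Int) (out : Int) : Prop := out = soma_impares_consecutivos_alt caso
instance (caso : List Int) (out : Int) : Decidable (Spec_soma_impares_consecutivos caso out) := by unfold Spec_soma_impares_consecutivos; infer_instance

-- ===== CLAIM (what is proved, stated in full; the proofs are below) =====
def Claim_equal_soma_impares_consecutivos : Prop := ∀ (caso : List Int), Dom_soma_impares_consecutivos caso → Pre_soma_impares_consecutivos caso → Spec_soma_impares_consecutivos caso (soma_impares_consecutivos caso)

-- ===== LEMMAS AND PROOFS =====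

-- the first odd number ≥ x
def pvFirstOdd (x : Int) : Int := if PySem.Int.mod x 2 ≠ 0 then x else x + 1

lemma pvSomaLoop_eq (c0 n : Int) (fuel : Nat) :
    ∀ (soma impares passo : Int), impares ≤ n →
      2 * (n - impares) + (if (c0 + passo) % 2 = 0 then 1 else 0) < (fuel : Int) →
      pvSomaLoop c0 n soma impares passo fuel =
        soma + (n - impares) * pvFirstOdd (c0 + passo)
             + (n - impares) * (n - impares - 1) := by
  induction fuel with
  | zero =>
      intro soma i p h hf
      exfalso; revert hf; split_ifs <;> omega
  | succ fuel ih =>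
      intro soma i p h hf
      by_cases hlt : i < n
      · rw [pvSomaLoop, if_pos hlt]
        have hm : PySem.Int.mod (c0 + p) 2 = (c0 + p) % 2 :=
          PySem.Int.mod_eq_emod_of_pos (by norm_num)
        have hm1 : PySem.Int.mod (c0 + (p + 1)) 2 = (c0 + (p + 1)) % 2 :=
          PySem.Int.mod_eq_emod_of_pos (by norm_num)
        by_cases hodd : (c0 + p) % 2 = 0
        · rw [if_neg (by rw [hm]; omega)]
          rw [ih soma i (p + 1) h (by split_ifs at hf ⊢ <;> omega)]
          have e1 : pvFirstOdd (c0 + p) = c0 + p + 1 := by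
            unfold pvFirstOdd; rw [hm]; split_ifs <;> omega
          have e2 : pvFirstOdd (c0 + (p + 1)) = c0 + p + 1 := by
            unfold pvFirstOdd; rw [hm1]; split_ifs <;> omega
          rw [e1, e2]
        · rw [if_pos (by rw [hm]; omega)]
          rw [ih (soma + (c0 + p)) (i + 1) (p + 1) (by omega)
                (by split_ifs at hf ⊢ <;> omega)]
          have e1 : pvFirstOdd (c0 + p) = c0 + p := by
            unfold pvFirstOdd; rw [hm]; split_ifs <;> omega
          have e2 : pvFirstOdd (c0 + (p + 1)) = c0 + p + 2 := by
            unfold pvFirstOdd; rw [hm1]; split_ifs <;> omega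
          rw [e1, e2]; ring
      · rw [pvSomaLoop, if_neg hlt]
        have hni : n - i = 0 := by omega
        rw [hni]; ring

-- ===== VERDICT (by name: the statement is the Claim_ definition above) =====
theorem soma_impares_consecutivos_spec : Claim_equal_soma_impares_consecutivos := by
  intro caso _ _
  unfold Spec_soma_impares_consecutivos soma_impares_consecutivos soma_impares_consecutivos_alt
  set c0 := PySem.List.pyGetD caso 0 0
  set n := PySem.List.pyGetD caso 1 0
  by_cases hn : n ≤ 0
  · rw [pvSomaLoop]
    simp [hn, show ¬ (0 < n) by omega]
  · rw [pvSomaLoop_eq c0 n ((2 * n).toNat + 2) 0 0 0 (by omega)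
        (by push_cast; split_ifs <;> omega)]
    simp only [pvFirstOdd, add_zero, if_neg hn]
    split_ifs <;> ring
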